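-- pv_equiv track=rewrite | github.com/lachlanmcintosh/ev_likelihoods | prismm/run_build_trees_and_timings.py | check_last_character
-- ===== SOURCE A (Python) =====
-- def check_last_character(code):
--     """
--     Checks if the last character of the given code is 'G' or '0' versus a non-zero integer.
--
--     Parameters:
--         code (str): Code represented as a string.
--
--     Returns:
--         bool: True if the last character of the code is 'G' or '0', False if it's a non-zero integer.
--     """
--
--     while code and code[-1] == '0':
--         code = code[:-1]
--         if len(code) == 0:
--             return True
--
--     if code and code[-1] in {'G', '0'}:
--         return True
--     else:
--         return False
-- ===== SOURCE B (Python) =====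
-- def check_last_character(code):
--     ok = True
--     for c in code:
--         if c != '0':
--             ok = (c == 'G')
--     return bool(code) and ok
-- ===== Notes on version B (the rewrite author's own statement) =====
-- stated objective: alternative
-- what changed: Replaces A's backward strip-and-test (repeated code[:-1] slicing then a last-character membership test) with a single forward pass over the characters maintaining one boolean accumulator that records whether the most recently seen non-zero-digit character was the letter G.
import Mathlib
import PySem

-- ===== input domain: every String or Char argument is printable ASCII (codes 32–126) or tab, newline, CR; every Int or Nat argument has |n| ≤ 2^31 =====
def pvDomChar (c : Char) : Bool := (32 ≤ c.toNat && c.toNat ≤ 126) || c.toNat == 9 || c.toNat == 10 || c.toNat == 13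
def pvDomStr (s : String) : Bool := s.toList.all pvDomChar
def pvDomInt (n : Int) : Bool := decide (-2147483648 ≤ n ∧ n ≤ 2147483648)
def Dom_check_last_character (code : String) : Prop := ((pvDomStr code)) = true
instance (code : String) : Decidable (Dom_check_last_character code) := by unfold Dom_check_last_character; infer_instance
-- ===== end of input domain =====

-- B replaces A's backward strip-and-test with one forward pass keeping a boolean accumulator (objective: alternative).

-- ===== PORT A =====
-- code[:-1] on a list of characters (cited by the port's termination proof)
theorem pv_slice_neg_one (cs : List Char) :
    PySem.List.slice cs none (some (-1)) = cs.dropLast := by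
  simp [PySem.List.slice, List.dropLast_eq_take]

-- the `while code and code[-1] == '0'` loop, then the final if/else, step for step
def clc_loop (cs : List Char) : Bool :=
  if h : cs ≠ [] ∧ PySem.List.pyGet? cs (-1) = some '0' then
    let cs' := PySem.List.slice cs none (some (-1))
    if cs'.length = 0 then true
    else clc_loop cs'
  else
    if cs ≠ [] ∧ (PySem.List.pyGet? cs (-1) = some 'G' ∨ PySem.List.pyGet? cs (-1) = some '0')
    then true else false
termination_by cs.length
decreasing_by
  rw [pv_slice_neg_one, List.length_dropLast]
  have := List.length_pos_iff.mpr h.1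
  omega

def check_last_character (code : String) : Bool := clc_loop code.toList

-- ===== PORT B =====
-- the loop body: `if c != '0': ok = (c == 'G')`
def clcStep (ok : Bool) (c : Char) : Bool := if c ≠ '0' then c == 'G' else ok

def check_last_character_alt (code : String) : Bool :=
  !code.toList.isEmpty && code.toList.foldl clcStep true

-- ===== PRECONDITION & SPEC =====
def Spec_check_last_character (code : String) (out : Bool) : Prop := out = check_last_character_alt code
instance (code : String) (out : Bool) : Decidable (Spec_check_last_character code out) := by unfold Spec_check_last_character; infer_instance

-- ===== CLAIM (what is proved, stated in full; the proofs are below) =====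
def Claim_equal_check_last_character : Prop := ∀ (code : String), Dom_check_last_character code → Spec_check_last_character code (check_last_character code)

-- ===== LEMMAS AND PROOFS =====
theorem pyGet_last (l : List Char) (a : Char) :
    PySem.List.pyGet? (l ++ [a]) (-1) = some a := by
  simp [PySem.List.pyGet?, PySem.List.pyIdx?]

theorem clc_loop_eq (cs : List Char) :
    clc_loop cs = (!cs.isEmpty && cs.foldl clcStep true) := by
  induction cs using List.reverseRecOn with
  | nil => simp [clc_loop]
  | append_singleton l a ih =>
    by_cases ha : a = '0'
    · subst ha
      rw [clc_loop]
      simp only [pyGet_last, pv_slice_neg_one]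
      rcases List.eq_nil_or_concat l with h0 | ⟨l', b, rfl⟩
      · subst h0; simp [clcStep]
      · have e1 : (l' ++ [b]).isEmpty = false := by simp
        have e2 : (l' ++ [b] ++ ['0']).isEmpty = false := by simp
        simp only [List.concat_eq_append] at ih ⊢
        simp [ih, e1, List.foldl_append, clcStep]
    · rw [clc_loop]
      simp only [pyGet_last]
      have hne : l ++ [a] ≠ [] := by simp
      simp [ha, hne, List.foldl_append, clcStep]
      by_cases hg : a = 'G' <;> simp [hg]

-- ===== VERDICT (by name: the statement is the Claim_ definition above) =====
theorem check_last_character_spec : Claim_equal_check_last_character := by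
  intro code _
  unfold Spec_check_last_character check_last_character check_last_character_alt
  exact clc_loop_eq code.toList
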